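-- pv_equiv track=rewrite | github.com/carsio/music-search-engine | src/music_search/ranking.py | _tf_for_doc
-- ===== SOURCE A (Python) =====
-- def _tf_for_doc(postings: list[tuple[int, int]], doc_id: int) -> int:
--     # Postings são ordenadas por doc_id; busca binária mantém score() O(log n).
--     lo, hi = 0, len(postings)
--     while lo < hi:
--         mid = (lo + hi) // 2
--         mid_doc, mid_tf = postings[mid]
--         if mid_doc == doc_id:
--             return mid_tf
--         if mid_doc < doc_id:
--             lo = mid + 1
--         else:
--             hi = mid
--     return 0
-- ===== SOURCE B (Python) =====
-- def _tf_for_doc(postings: list[tuple[int, int]], doc_id: int) -> int: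
--     # Recursive binary search over list views: probe the head of the upper half
--     # (tail[0] == seg[len(seg)//2], the same midpoint A indexes), so the probe
--     # sequence is identical on every input, sorted or not.
--     def go(seg):
--         tail = seg[len(seg) // 2:]
--         if not tail:
--             return 0
--         d, tf = tail[0]
--         if d == doc_id:
--             return tf
--         if d < doc_id:
--             return go(tail[1:])
--         return go(seg[:len(seg) // 2])
--     return go(postings)
-- ===== Notes on version B (the rewrite author's own statement) =====
-- stated objective: alternative
-- what changed: Replaces the iterative lo/hi index loop by a recursive helper that splits the current list view at its midpoint, pattern-matches on the upper half (probing its head), and recurses on the remaining sublist; no index state at all, identical probe sequence.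
import Mathlib
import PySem

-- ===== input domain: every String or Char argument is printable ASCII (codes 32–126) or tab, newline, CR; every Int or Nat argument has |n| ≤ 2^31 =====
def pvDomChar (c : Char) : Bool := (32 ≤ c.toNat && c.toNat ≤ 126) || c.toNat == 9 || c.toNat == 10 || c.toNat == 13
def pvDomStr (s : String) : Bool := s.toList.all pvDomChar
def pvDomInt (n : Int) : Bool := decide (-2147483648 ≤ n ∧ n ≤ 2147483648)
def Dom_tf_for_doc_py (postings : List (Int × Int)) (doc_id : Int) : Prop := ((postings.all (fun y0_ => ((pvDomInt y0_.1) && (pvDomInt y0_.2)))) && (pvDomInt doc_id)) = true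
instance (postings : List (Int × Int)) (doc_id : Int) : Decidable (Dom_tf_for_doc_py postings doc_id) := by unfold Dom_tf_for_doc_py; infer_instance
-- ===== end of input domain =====

-- B replaces A's iterative lo/hi index loop by a recursive helper that splits the
-- current list view at its midpoint and pattern-matches on the upper half (same
-- probe sequence); alternative decomposition, return-value equivalence proved on all inputs.

-- ===== PORT A =====
-- while-loop state (lo, hi) as structural recursion on hi - lo; postings[mid] is
-- always in range at every reachable state (0 <= lo <= mid < hi <= len), so getD is exact.
def tfLoopA (postings : List (Int × Int)) (doc_id : Int) (lo hi : Nat) : Int :=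
  if _h : lo < hi then
    if (postings.getD ((lo + hi) / 2) (0, 0)).1 = doc_id then
      (postings.getD ((lo + hi) / 2) (0, 0)).2
    else if (postings.getD ((lo + hi) / 2) (0, 0)).1 < doc_id then
      tfLoopA postings doc_id ((lo + hi) / 2 + 1) hi
    else
      tfLoopA postings doc_id lo ((lo + hi) / 2)
  else 0
termination_by hi - lo
decreasing_by all_goals omega

def tf_for_doc_py (postings : List (Int × Int)) (doc_id : Int) : Int :=
  tfLoopA postings doc_id 0 postings.length

-- ===== PORT B =====
-- go(seg): tail = seg[len//2:] is List.drop (len/2); 'not tail' / tail[0] / tail[1:]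
-- become a match on the cons shape of that drop; seg[:len//2] is List.take (len/2).
def tfGoB (seg : List (Int × Int)) (doc_id : Int) : Int :=
  match hm : seg.drop (seg.length / 2) with
  | [] => 0
  | (d, tf) :: rest =>
      if d = doc_id then tf
      else if d < doc_id then tfGoB rest doc_id
      else tfGoB (seg.take (seg.length / 2)) doc_id
termination_by seg.length
decreasing_by
  · have := congrArg List.length hm
    simp [List.length_drop] at this
    omega
  · have hne : seg.drop (seg.length / 2) ≠ [] := by rw [hm]; simp
    have : seg ≠ [] := by intro h; subst h; simp at hne
    have : 0 < seg.length := List.length_pos_iff.mpr this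
    simp [List.length_take]
    omega

def tf_for_doc_py_alt (postings : List (Int × Int)) (doc_id : Int) : Int :=
  tfGoB postings doc_id

-- ===== PRECONDITION & SPEC =====
def Spec_tf_for_doc_py (postings : List (Int × Int)) (doc_id : Int) (out : Int) : Prop := out = tf_for_doc_py_alt postings doc_id
instance (postings : List (Int × Int)) (doc_id : Int) (out : Int) : Decidable (Spec_tf_for_doc_py postings doc_id out) := by unfold Spec_tf_for_doc_py; infer_instance

-- ===== CLAIM (what is proved, stated in full; the proofs are below) =====
def Claim_equal_tf_for_doc_py : Prop := ∀ (postings : List (Int × Int)) (doc_id : Int), Dom_tf_for_doc_py postings doc_id → Spec_tf_for_doc_py postings doc_id (tf_for_doc_py postings doc_id)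

-- ===== LEMMAS AND PROOFS =====

theorem tfGoB_nil (doc_id : Int) : tfGoB [] doc_id = 0 := by unfold tfGoB; simp

theorem tfGoB_cons (seg : List (Int × Int)) (doc_id d tf : Int) (rest : List (Int × Int))
    (h : seg.drop (seg.length / 2) = (d, tf) :: rest) :
    tfGoB seg doc_id =
      if d = doc_id then tf
      else if d < doc_id then tfGoB rest doc_id
      else tfGoB (seg.take (seg.length / 2)) doc_id := by
  rw [tfGoB]
  split
  · next heq => rw [h] at heq; cases heq
  · next d' tf' rest' heq =>
      rw [h] at heq
      injection heq with h1 h2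
      injection h1 with hd htf
      subst hd; subst htf; subst h2; rfl

-- the loop at state (lo, hi) computes what go computes on the slice postings[lo:hi]
theorem tfLoopA_eq_tfGoB (doc_id : Int) :
    ∀ (n : Nat) (postings : List (Int × Int)) (lo hi : Nat), hi - lo ≤ n →
      hi ≤ postings.length →
      tfLoopA postings doc_id lo hi = tfGoB ((postings.drop lo).take (hi - lo)) doc_id := by
  intro n
  induction n with
  | zero =>
    intro postings lo hi hle hlen
    rw [tfLoopA]
    simp only [show ¬ lo < hi by omega, show hi - lo = 0 by omega, dite_false,
      List.take_zero, tfGoB_nil]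
  | succ n ih =>
    intro postings lo hi hle hlen
    by_cases hlt : lo < hi
    · set seg := (postings.drop lo).take (hi - lo) with hseg_def
      have hseg : seg.length = hi - lo := by
        simp [hseg_def, List.length_take, List.length_drop]; omega
      have hmidx : seg.length / 2 = (lo + hi) / 2 - lo := by rw [hseg]; omega
      have hmlt : (lo + hi) / 2 - lo < seg.length := by rw [hseg]; omega
      have hget : seg[(lo + hi) / 2 - lo]? = postings[(lo + hi) / 2]? := by
        rw [hseg_def, List.getElem?_take_of_lt (by omega), List.getElem?_drop]
        congr 1; omega
      have hdropeq : seg.drop (seg.length / 2)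
          = seg[(lo + hi) / 2 - lo] :: seg.drop ((lo + hi) / 2 - lo + 1) := by
        rw [hmidx]; exact List.drop_eq_getElem_cons hmlt
      have hpin : (lo + hi) / 2 < postings.length := by omega
      have hgetv : seg[(lo + hi) / 2 - lo] = postings[(lo + hi) / 2] := by
        have := hget
        rw [List.getElem?_eq_getElem hmlt, List.getElem?_eq_getElem hpin] at this
        exact Option.some.injEq _ _ ▸ (by simpa using this)
      rw [tfLoopA]
      rw [tfGoB_cons seg doc_id (postings[(lo + hi) / 2]).1 (postings[(lo + hi) / 2]).2
        (seg.drop ((lo + hi) / 2 - lo + 1)) (by rw [hdropeq, hgetv])]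
      have hgd : postings.getD ((lo + hi) / 2) (0, 0) = postings[(lo + hi) / 2] := by
        simp [List.getD, List.getElem?_eq_getElem hpin]
      simp only [dif_pos hlt, hgd]
      by_cases heq : (postings[(lo + hi) / 2]).1 = doc_id
      · simp only [if_pos heq]
      · simp only [if_neg heq]
        by_cases hlt2 : (postings[(lo + hi) / 2]).1 < doc_id
        · simp only [if_pos hlt2]
          rw [ih postings ((lo + hi) / 2 + 1) hi (by omega) hlen]
          have e1 : hi - lo - ((lo + hi) / 2 - lo + 1) = hi - ((lo + hi) / 2 + 1) := by omega
          have e2 : lo + ((lo + hi) / 2 - lo + 1) = (lo + hi) / 2 + 1 := by omega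
          rw [hseg_def, List.drop_take, List.drop_drop, e1, e2]
        · simp only [if_neg hlt2]
          rw [ih postings lo ((lo + hi) / 2) (by omega) (by omega)]
          have e3 : min ((lo + hi) / 2 - lo) (hi - lo) = (lo + hi) / 2 - lo := by omega
          rw [hmidx, hseg_def, List.take_take, e3]
    · have h0 : hi - lo = 0 := by omega
      rw [tfLoopA]
      simp only [dif_neg hlt, h0, List.take_zero, tfGoB_nil]

-- ===== VERDICT (by name: the statement is the Claim_ definition above) =====
theorem tf_for_doc_py_spec : Claim_equal_tf_for_doc_py := by
  intro postings doc_id _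
  unfold Spec_tf_for_doc_py tf_for_doc_py tf_for_doc_py_alt
  rw [tfLoopA_eq_tfGoB doc_id postings.length postings (0 : Nat) postings.length (by omega) le_rfl]
  simp
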